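-- pv_equiv track=rewrite | github.com/trotsky98/PYTHON-SEM | lesson 4/task1.py | all_sets
-- ===== SOURCE A (Python) =====
-- def all_sets(num_list):
--     new_list = []
--     for k in range(len(num_list)):
--         n = num_list[k]
--         temporary = [n]
--         for i in range(k + 1, len(num_list)):
--             if num_list[i] > n:
--                 temporary.append(num_list[i])
--                 n = num_list[i]
--         if len(temporary) > 1:
--             new_list.append(temporary)
--
--     return new_list
-- ===== SOURCE B (Python) =====
-- def all_sets(num_list):
--     result = []
--     rest = num_list
--     while rest:
--         # phase 1: running maxima of the suffix (non-decreasing table)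
--         maxima = []
--         m = rest[0]
--         for x in rest:
--             m = x if x > m else m
--             maxima.append(m)
--         # phase 2: collapse consecutive equal maxima into a strict chain
--         chain = [maxima[0]]
--         for v in maxima[1:]:
--             if v > chain[-1]:
--                 chain.append(v)
--         if len(chain) > 1:
--             result.append(chain)
--         rest = rest[1:]
--     return result
-- ===== Notes on version B (the rewrite author's own statement) =====
-- stated objective: alternative
-- what changed: A fuses selection into one index-based scan per start; B walks the tails of the list and, per suffix, first builds the running-maxima table and then collapses consecutive equal maxima into the strict chain (two-phase).
import Mathlib
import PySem

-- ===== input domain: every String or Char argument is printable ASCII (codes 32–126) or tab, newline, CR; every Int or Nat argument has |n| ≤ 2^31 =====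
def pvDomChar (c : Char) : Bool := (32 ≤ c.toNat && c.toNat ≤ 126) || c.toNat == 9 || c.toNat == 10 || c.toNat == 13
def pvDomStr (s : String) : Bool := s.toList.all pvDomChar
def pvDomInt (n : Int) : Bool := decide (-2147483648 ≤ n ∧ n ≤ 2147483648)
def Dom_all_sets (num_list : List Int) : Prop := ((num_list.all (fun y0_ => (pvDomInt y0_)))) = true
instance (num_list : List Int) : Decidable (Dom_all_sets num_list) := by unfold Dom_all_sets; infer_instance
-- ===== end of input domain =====

-- B walks the suffixes and computes each chain in two phases (running maxima, then collapse
-- consecutive equal maxima); same O(n^2) cost, different decomposition ("alternative").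

-- ===== PORT A =====
-- inner for-loop of A: state (temporary, n); n is dead after the loop, so only temporary is returned
def innerA (xs : List Int) (i : Nat) (temp : List Int) (n : Int) : List Int :=
  if h : i < xs.length then
    if xs[i] > n then innerA xs (i + 1) (temp ++ [xs[i]]) xs[i]
    else innerA xs (i + 1) temp n
  else temp
termination_by xs.length - i

-- outer for-loop of A over k in range(len(num_list))
def outerA (xs : List Int) (k : Nat) (acc : List (List Int)) : List (List Int) :=
  if h : k < xs.length then
    let temp := innerA xs (k + 1) [xs[k]] xs[k]
    outerA xs (k + 1) (if temp.length > 1 then acc ++ [temp] else acc)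
  else acc
termination_by xs.length - k

def all_sets (num_list : List Int) : List (List Int) := outerA num_list 0 []

-- ===== PORT B =====
-- phase 1: running maxima of the suffix, seeded with its first element
def phase1 : List Int → Int → List Int
  | [], _ => []
  | x :: xs, m =>
    let m' := if x > m then x else m
    m' :: phase1 xs m'

-- phase 2: keep each value strictly greater than the last kept one
def dedupGT : Int → List Int → List Int
  | _, [] => []
  | last, v :: vs => if v > last then v :: dedupGT v vs else dedupGT last vs

-- the while loop over the tails, with the result accumulator
def goB : List Int → List (List Int) → List (List Int)
  | [], result => result
  | x :: xs, result =>
    match phase1 (x :: xs) x with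
    | [] => goB xs result   -- unreachable: phase1 of a nonempty list is nonempty
    | h :: t =>
      let chain := h :: dedupGT h t
      goB xs (if chain.length > 1 then result ++ [chain] else result)

def all_sets_alt (num_list : List Int) : List (List Int) := goB num_list []

-- ===== PRECONDITION & SPEC =====
def Spec_all_sets (num_list : List Int) (out : List (List Int)) : Prop := out = all_sets_alt num_list
instance (num_list : List Int) (out : List (List Int)) : Decidable (Spec_all_sets num_list out) := by unfold Spec_all_sets; infer_instance

-- ===== CLAIM (what is proved, stated in full; the proofs are below) =====
def Claim_equal_all_sets : Prop := ∀ (num_list : List Int), Dom_all_sets num_list → Spec_all_sets num_list (all_sets num_list)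

-- ===== LEMMAS AND PROOFS =====

-- A's inner loop appends exactly the greedy strict chain of the suffix
theorem innerA_eq (xs : List Int) (i : Nat) (temp : List Int) (n : Int) :
    innerA xs i temp n = temp ++ dedupGT n (xs.drop i) := by
  fun_induction innerA xs i temp n with
  | case1 i temp n h hgt ih =>
    rw [ih, List.drop_eq_getElem_cons h, dedupGT]
    simp [hgt]
  | case2 i temp n h hgt ih =>
    rw [ih, List.drop_eq_getElem_cons h, dedupGT]
    simp [hgt]
  | case3 i temp n h =>
    simp [dedupGT, List.drop_eq_nil_of_le (Nat.le_of_not_lt h)]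

-- collapsing the running maxima gives the greedy strict chain
theorem dedupGT_phase1 (xs : List Int) (n : Int) :
    dedupGT n (phase1 xs n) = dedupGT n xs := by
  induction xs generalizing n with
  | nil => rfl
  | cons x t ih =>
    by_cases hx : x > n
    · simp [phase1, dedupGT, hx, ih]
    · simp [phase1, dedupGT, hx, ih]

theorem outerA_eq_goB (xs : List Int) (k : Nat) (acc : List (List Int)) :
    outerA xs k acc = goB (xs.drop k) acc := by
  fun_induction outerA xs k acc with
  | case1 k acc h temp ih =>
    simp only [dite_eq_ite] at ih
    rw [ih, List.drop_eq_getElem_cons h]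
    have hx : ¬ (xs[k] > xs[k]) := lt_irrefl _
    simp only [goB, phase1, if_neg hx, dedupGT_phase1]
    rw [show temp = xs[k] :: dedupGT xs[k] (List.drop (k + 1) xs) from
      innerA_eq xs (k + 1) [xs[k]] xs[k]]
  | case2 k acc h =>
    simp [goB, List.drop_eq_nil_of_le (Nat.le_of_not_lt h)]

-- ===== VERDICT (by name: the statement is the Claim_ definition above) =====
theorem all_sets_spec : Claim_equal_all_sets := by
  intro xs _
  unfold Spec_all_sets all_sets all_sets_alt
  simpa using outerA_eq_goB xs 0 []
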